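-- pv_equiv track=rewrite | github.com/ludyw21/OpenGame_AutoPiano | app/meowauto/utils/midi_tools.py | _nearest_white_pc
-- ===== SOURCE A (Python) =====
-- WHITE_PCS = [0, 2, 4, 5, 7, 9, 11]
--
-- def _nearest_white_pc(pc: int, mode: str = "nearest") -> int:
--     """Map a pitch class to nearest white key.
--     mode: 'down' (prefer lower), 'nearest' (min abs distance), 'scale' (to C major by nearest)
--     """
--     pc = pc % 12
--     if pc in WHITE_PCS:
--         return pc
--     if mode == "down":
--         # step downward until a white key is found
--         for d in range(1, 7):
--             cand = (pc - d) % 12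
--             if cand in WHITE_PCS:
--                 return cand
--     # nearest by absolute distance (ties: prefer lower)
--     best = None
--     best_dist = 99
--     for w in WHITE_PCS:
--         dist = min((pc - w) % 12, (w - pc) % 12)
--         if dist < best_dist or (dist == best_dist and ((w - pc) % 12) > ((pc - (best or 0)) % 12)):
--             best = w
--             best_dist = dist
--     return best if best is not None else pc
-- ===== SOURCE B (Python) =====
-- WHITE_SET = frozenset((0, 2, 4, 5, 7, 9, 11))
--
-- def _nearest_white_pc(pc: int, mode: str = "nearest") -> int:
--     # Every non-white pitch class sits exactly one semitone above a white key,
--     # and all three modes resolve to that lower neighbour, so mode is irrelevant.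
--     pc = pc % 12
--     return pc if pc in WHITE_SET else (pc - 1) % 12
-- ===== Notes on version B (the rewrite author's own statement) =====
-- stated objective: simpler
-- what changed: Replaced the per-mode candidate loops and tie-break bookkeeping with a closed-form map (white pc stays, black pc drops one semitone), proving mode never affects the result.
import Mathlib
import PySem

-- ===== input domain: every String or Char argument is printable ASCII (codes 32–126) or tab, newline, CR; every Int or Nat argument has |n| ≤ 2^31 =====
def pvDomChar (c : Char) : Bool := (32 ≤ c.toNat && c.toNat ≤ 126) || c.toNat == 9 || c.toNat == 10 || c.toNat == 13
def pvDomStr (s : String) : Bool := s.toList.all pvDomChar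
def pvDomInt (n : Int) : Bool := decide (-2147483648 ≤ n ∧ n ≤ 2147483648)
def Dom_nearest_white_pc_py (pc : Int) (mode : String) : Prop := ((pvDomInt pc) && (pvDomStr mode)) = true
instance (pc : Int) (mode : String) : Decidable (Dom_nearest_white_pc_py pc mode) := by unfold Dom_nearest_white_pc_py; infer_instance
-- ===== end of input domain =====

-- B replaces A's mode-dependent loops and tie-break bookkeeping with the closed
-- form "white pc stays, black pc drops one semitone" (mode never affects the result).

-- ===== PORT A =====
-- Transliteration of _nearest_white_pc: membership tests on WHITE_PCS, the
-- mode == "down" scanning loop, then the nearest-by-distance fold with the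
-- same (best, best_dist) state and the same tie-break expression.
def pvWHITE_PCS : List Int := [0, 2, 4, 5, 7, 9, 11]

def nearest_white_pc_py (pc : Int) (mode : String) : Int :=
  let pc := PySem.Int.mod pc 12
  if pc ∈ pvWHITE_PCS then pc
  else
    let downResult : Option Int :=
      if mode = "down" then
        (PySem.List.pyRange 1 7 1).foldl (fun acc d =>
          match acc with
          | some _ => acc
          | none =>
            let cand := PySem.Int.mod (pc - d) 12
            if cand ∈ pvWHITE_PCS then some cand else none) none
      else none
    match downResult with
    | some c => c
    | none =>
      let st := pvWHITE_PCS.foldl (fun (st : Option Int × Int) w =>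
        let best := st.1
        let best_dist := st.2
        let dist := min (PySem.Int.mod (pc - w) 12) (PySem.Int.mod (w - pc) 12)
        if dist < best_dist ∨ (dist = best_dist ∧
            PySem.Int.mod (w - pc) 12 > PySem.Int.mod (pc - best.getD 0) 12) then
          (some w, dist)
        else st) (none, 99)
      match st.1 with
      | some b => b
      | none => pc

-- ===== PORT B =====
-- Transliteration of Source B: normalize, one set-membership test, closed form.
def pvWHITE_SET : PySem.Set Int := PySem.Set.ofList [0, 2, 4, 5, 7, 9, 11]

def nearest_white_pc_py_alt (pc : Int) (mode : String) : Int :=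
  let pc := PySem.Int.mod pc 12
  if PySem.Set.contains pvWHITE_SET pc then pc else PySem.Int.mod (pc - 1) 12

-- ===== PRECONDITION & SPEC =====
def Spec_nearest_white_pc_py (pc : Int) (mode : String) (out : Int) : Prop := out = nearest_white_pc_py_alt pc mode
instance (pc : Int) (mode : String) (out : Int) : Decidable (Spec_nearest_white_pc_py pc mode out) := by unfold Spec_nearest_white_pc_py; infer_instance

-- ===== CLAIM (what is proved, stated in full; the proofs are below) =====
def Claim_equal_nearest_white_pc_py : Prop := ∀ (pc : Int) (mode : String), Dom_nearest_white_pc_py pc mode → Spec_nearest_white_pc_py pc mode (nearest_white_pc_py pc mode)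

-- ===== LEMMAS AND PROOFS =====
-- Both ports depend on pc only through pc % 12 ∈ [0, 12); finite case split.
lemma pv_main (r : Int) (hr : PySem.Int.mod r 12 = r) (h0 : 0 ≤ r) (h12 : r < 12)
    (mode : String) : nearest_white_pc_py r mode = nearest_white_pc_py_alt r mode := by
  by_cases hm : mode = "down" <;>
    [skip; simp only [nearest_white_pc_py, nearest_white_pc_py_alt, hr, if_neg hm]] <;>
  · subst_vars
    interval_cases r <;> decide

-- ===== VERDICT (by name: the statement is the Claim_ definition above) =====
theorem nearest_white_pc_py_spec : Claim_equal_nearest_white_pc_py := by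
  intro pc mode _
  unfold Spec_nearest_white_pc_py
  have hmod : PySem.Int.mod (PySem.Int.mod pc 12) 12 = PySem.Int.mod pc 12 := by
    simp [PySem.Int.mod]
  have hA : nearest_white_pc_py pc mode = nearest_white_pc_py (PySem.Int.mod pc 12) mode := by
    simp only [nearest_white_pc_py, hmod]
  have hB : nearest_white_pc_py_alt pc mode = nearest_white_pc_py_alt (PySem.Int.mod pc 12) mode := by
    simp only [nearest_white_pc_py_alt, hmod]
  rw [hA, hB]
  exact pv_main _ hmod (PySem.Int.mod_nonneg pc (by norm_num)) (PySem.Int.mod_lt pc (by norm_num)) mode
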